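-- pv_equiv track=rewrite | github.com/1darshanpatil/dd0a608c003667777da5c24f40ea6104ed90cffe1326d42378c5c4b7d2bdfe8f | paper_1.py | compute_p_k
-- ===== SOURCE A (Python) =====
-- q = lambda n, k: n // k
--
-- def compute_p_k(n, k):
--     if k == 3:
--         # Base case for p_3(n)
--         q_3 = q(n, 3)
--         s = 0
--         for i in range(1, q_3 + 1):
--             s += q(n - i, 2) - (i - 1)
--         return s
--     else:
--         # Recursive computation for p_k(n)
--         q_k = q(n, k)
--         s = 0
--         for u in range(q_k):
--             s += compute_p_k(n - k * u - 1, k - 1)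
--         return s
-- ===== SOURCE B (Python) =====
-- def compute_p_k(n, k):
--     memo = {}
--     def p(n, k):
--         if k == 3:
--             q3 = n // 3
--             if q3 <= 0:
--                 return 0
--             return (n - 1) ** 2 // 4 - (n - q3 - 1) ** 2 // 4 - q3 * (q3 - 1) // 2
--         key = (n, k)
--         if key in memo:
--             return memo[key]
--         s = 0
--         for u in range(n // k):
--             s += p(n - k * u - 1, k - 1)
--         memo[key] = s
--         return s
--     return p(n, k)
-- ===== Notes on version B (the rewrite author's own statement) =====
-- stated objective: alternative
-- what changed: B replaces A's plain nested recursion by a top-down recursion memoized on (n,k) and computes the k=3 base case with a closed-form formula instead of A's loop.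
import Mathlib
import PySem

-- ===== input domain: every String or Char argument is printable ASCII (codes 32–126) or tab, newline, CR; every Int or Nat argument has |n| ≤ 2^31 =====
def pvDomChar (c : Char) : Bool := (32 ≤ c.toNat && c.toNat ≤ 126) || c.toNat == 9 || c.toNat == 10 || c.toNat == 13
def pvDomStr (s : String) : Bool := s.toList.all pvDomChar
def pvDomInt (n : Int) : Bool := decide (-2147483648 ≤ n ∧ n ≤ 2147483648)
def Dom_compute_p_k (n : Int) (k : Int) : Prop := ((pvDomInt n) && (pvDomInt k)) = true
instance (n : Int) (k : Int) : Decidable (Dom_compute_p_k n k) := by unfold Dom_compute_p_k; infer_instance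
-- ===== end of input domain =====

-- B memoizes the (n,k) recursion and computes the k=3 base case by a closed formula; A recurses without a cache.

-- ===== PORT A =====
-- A's k=3 loop: s = sum over i in range(1, n//3 + 1) of ((n-i)//2 - (i-1))
def pvABase (n : Int) : Int :=
  (PySem.List.pyRange 1 (PySem.Int.floordiv n 3 + 1) 1).foldl
    (fun s i => s + (PySem.Int.floordiv (n - i) 2 - (i - 1))) 0

-- fuel only makes the recursion total; with fuel = (k-3).toNat it is never exhausted for k ≥ 3
def computeAux (fuel : Nat) (n k : Int) : Int :=
  if k = 3 then pvABase n
  else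
    match fuel with
    | 0 => 0
    | f + 1 =>
      (PySem.List.pyRange 0 (PySem.Int.floordiv n k) 1).foldl
        (fun s u => s + computeAux f (n - k * u - 1) (k - 1)) 0

def compute_p_k (n : Int) (k : Int) : Int := computeAux (k - 3).toNat n k

-- ===== PORT B =====
-- closed-form base: (n-1)^2//4 - (n-q3-1)^2//4 - q3*(q3-1)//2 when q3 = n//3 > 0
def pvBBase (n : Int) : Int :=
  let q3 := PySem.Int.floordiv n 3
  if q3 ≤ 0 then 0
  else
    PySem.Int.floordiv ((n - 1) * (n - 1)) 4
      - PySem.Int.floordiv ((n - q3 - 1) * (n - q3 - 1)) 4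
      - PySem.Int.floordiv (q3 * (q3 - 1)) 2

-- memoized recursion: state is the memo dict, threaded through the loop (same fuel guard for totality)
def altAux (fuel : Nat) (n k : Int) (memo : PySem.Dict (Int × Int) Int) :
    Int × PySem.Dict (Int × Int) Int :=
  if k = 3 then (pvBBase n, memo)
  else
    match memo.get? (n, k) with
    | some v => (v, memo)
    | none =>
      match fuel with
      | 0 => (0, memo)
      | f + 1 =>
        let r :=
          (PySem.List.pyRange 0 (PySem.Int.floordiv n k) 1).foldl
            (fun sm u => (sm.1 + (altAux f (n - k * u - 1) (k - 1) sm.2).1,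
                          (altAux f (n - k * u - 1) (k - 1) sm.2).2))
            (0, memo)
        (r.1, r.2.insert (n, k) r.1)

def compute_p_k_alt (n : Int) (k : Int) : Int :=
  (altAux (k - 3).toNat n k PySem.Dict.empty).1

-- ===== PRECONDITION & SPEC =====
-- Pre_ admits k ≥ 3 plus the k < 3 inputs whose loop is empty (both programs return 0 there);
-- the excluded inputs all make A raise (ZeroDivisionError once k reaches 0, RecursionError for
-- negative k with negative n).
def Pre_compute_p_k (n : Int) (k : Int) : Prop :=
  3 ≤ k ∨ (k = 2 ∧ n < 2) ∨ (k = 1 ∧ n ≤ 0) ∨ (k < 0 ∧ (0 ≤ n ∨ k < n))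
instance (n : Int) (k : Int) : Decidable (Pre_compute_p_k n k) := by unfold Pre_compute_p_k; infer_instance
def pvWitness_compute_p_k : Int × Int := (10, 4)

def Spec_compute_p_k (n : Int) (k : Int) (out : Int) : Prop := out = compute_p_k_alt n k
instance (n : Int) (k : Int) (out : Int) : Decidable (Spec_compute_p_k n k out) := by unfold Spec_compute_p_k; infer_instance

-- ===== CLAIM (what is proved, stated in full; the proofs are below) =====
def Claim_equal_compute_p_k : Prop := ∀ (n : Int) (k : Int), Dom_compute_p_k n k → Pre_compute_p_k n k → Spec_compute_p_k n k (compute_p_k n k)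

-- ===== LEMMAS AND PROOFS =====

theorem gdiff (a : Int) : a * a / 4 - (a - 1) * (a - 1) / 4 = a / 2 := by
  rcases Int.even_or_odd a with ⟨t, ht⟩ | ⟨t, ht⟩
  · have h1 : a * a = 4 * (t * t) := by rw [ht]; ring
    have h2 : (a - 1) * (a - 1) = 4 * (t * t - t) + 1 := by rw [ht]; ring
    rw [h1, h2, ht]
    generalize t * t = u
    omega
  · have h1 : a * a = 4 * (t * t + t) + 1 := by rw [ht]; ring
    have h2 : (a - 1) * (a - 1) = 4 * (t * t) := by rw [ht]; ring
    rw [h1, h2, ht]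
    generalize t * t = u
    omega

theorem tdiff (x : Int) : (x + 1) * x / 2 - x * (x - 1) / 2 = x := by
  rcases Int.even_or_odd x with ⟨t, ht⟩ | ⟨t, ht⟩
  · have h1 : (x + 1) * x = 2 * (2 * (t * t) + t) := by rw [ht]; ring
    have h2 : x * (x - 1) = 2 * (2 * (t * t) - t) := by rw [ht]; ring
    rw [h1, h2, ht]
    generalize t * t = u
    omega
  · have h1 : (x + 1) * x = 2 * (2 * (t * t) + 3 * t + 1) := by rw [ht]; ring
    have h2 : x * (x - 1) = 2 * (2 * (t * t) + t) := by rw [ht]; ring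
    rw [h1, h2, ht]
    generalize t * t = u
    omega

theorem sumlem (m : Nat) (n : Int) :
    (PySem.List.pyRange 1 ((m : Int) + 1) 1).foldl
      (fun s i => s + ((n - i) / 2 - (i - 1))) 0
    = (n - 1) * (n - 1) / 4 - (n - (m : Int) - 1) * (n - (m : Int) - 1) / 4
        - (m : Int) * ((m : Int) - 1) / 2 := by
  induction m with
  | zero =>
    rw [PySem.List.pyRange_one_eq_nil (by norm_num)]
    simp
  | succ m ih =>
    have h : ((m + 1 : Nat) : Int) + 1 = ((m : Int) + 1) + 1 := by push_cast; ring
    rw [h, PySem.List.pyRange_one_succ_right (by omega), List.foldl_append]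
    simp only [List.foldl_cons, List.foldl_nil, ih]
    have hg := gdiff (n - (m : Int) - 1)
    have ht := tdiff (m : Int)
    push_cast
    have e3 : ((m : Int) + 1) - 1 = (m : Int) := by ring
    rw [e3]
    have e1 : n - ((m : Int) + 1) - 1 = n - (m : Int) - 1 - 1 := by ring
    have e2 : n - ((m : Int) + 1) = (n - (m : Int) - 1) := by ring
    rw [e1, e2]
    linarith [hg, ht]

theorem base_eq (n : Int) : pvABase n = pvBBase n := by
  unfold pvABase pvBBase
  have h3 : PySem.Int.floordiv n 3 = n / 3 := PySem.Int.floordiv_eq_ediv_of_pos (by norm_num)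
  rw [h3]
  by_cases hq : n / 3 ≤ 0
  · rw [PySem.List.pyRange_one_eq_nil (by omega)]
    simp [hq]
  · simp only [hq, if_false]
    have hm : n / 3 = ((n / 3).toNat : Int) := by omega
    have := sumlem (n / 3).toNat n
    simp only [PySem.Int.floordiv_eq_ediv_of_pos (show (0:Int) < 2 by norm_num),
      PySem.Int.floordiv_eq_ediv_of_pos (show (0:Int) < 4 by norm_num)] 
    rw [hm]
    rw [← this]

theorem computeAux_three (f : Nat) (n : Int) : computeAux f n 3 = pvABase n := by
  rw [computeAux.eq_def]; simp

theorem computeAux_succ (f : Nat) (n k : Int) (h : k ≠ 3) :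
    computeAux (f + 1) n k =
      (PySem.List.pyRange 0 (PySem.Int.floordiv n k) 1).foldl
        (fun s u => s + computeAux f (n - k * u - 1) (k - 1)) 0 := by
  rw [computeAux.eq_def]; simp [h]

theorem computeAux_fuel (f₁ : Nat) : ∀ (f₂ : Nat) (n k : Int), 3 ≤ k →
    k - 3 ≤ (f₁ : Int) → k - 3 ≤ (f₂ : Int) → computeAux f₁ n k = computeAux f₂ n k := by
  induction f₁ with
  | zero =>
    intro f₂ n k hk h1 _
    have : k = 3 := by omega
    subst this
    rw [computeAux_three, computeAux_three]
  | succ f ih =>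
    intro f₂ n k hk h1 h2
    by_cases hk3 : k = 3
    · subst hk3; rw [computeAux_three, computeAux_three]
    · have hk4 : 4 ≤ k := by omega
      obtain ⟨f₂', rfl⟩ : ∃ f₂', f₂ = f₂' + 1 := by
        cases f₂ with
        | zero => exfalso; simp at h2; omega
        | succ m => exact ⟨m, rfl⟩
      rw [computeAux_succ f n k hk3, computeAux_succ f₂' n k hk3]
      have hfun : (fun (s u : Int) => s + computeAux f (n - k * u - 1) (k - 1))
          = fun s u => s + computeAux f₂' (n - k * u - 1) (k - 1) := by
        funext s u
        rw [ih f₂' (n - k * u - 1) (k - 1) (by omega) (by omega) (by omega)]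
      rw [hfun]

def pvInv (d : PySem.Dict (Int × Int) Int) : Prop :=
  ∀ m j v, d.get? (m, j) = some v → v = compute_p_k m j

theorem inv_empty : pvInv PySem.Dict.empty := by
  intro m j v h
  rw [PySem.Dict.get?_empty] at h
  exact absurd h (by simp)

theorem altAux_three (f : Nat) (n : Int) (d : PySem.Dict (Int × Int) Int) :
    altAux f n 3 d = (pvBBase n, d) := by
  rw [altAux.eq_def]; simp

theorem altAux_hit (f : Nat) (n k : Int) (d : PySem.Dict (Int × Int) Int) (v : Int)
    (h3 : k ≠ 3) (hg : d.get? (n, k) = some v) : altAux f n k d = (v, d) := by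
  rw [altAux.eq_def]; simp [h3, hg]

theorem altAux_miss_fst (f : Nat) (n k : Int) (d : PySem.Dict (Int × Int) Int)
    (h3 : k ≠ 3) (hg : d.get? (n, k) = none) :
    (altAux (f + 1) n k d).1 =
      ((PySem.List.pyRange 0 (PySem.Int.floordiv n k) 1).foldl
        (fun sm u => (sm.1 + (altAux f (n - k * u - 1) (k - 1) sm.2).1,
                      (altAux f (n - k * u - 1) (k - 1) sm.2).2))
        (0, d)).1 := by
  rw [altAux.eq_def]; simp [h3, hg]

theorem altAux_miss_snd (f : Nat) (n k : Int) (d : PySem.Dict (Int × Int) Int)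
    (h3 : k ≠ 3) (hg : d.get? (n, k) = none) :
    (altAux (f + 1) n k d).2 =
      (((PySem.List.pyRange 0 (PySem.Int.floordiv n k) 1).foldl
        (fun sm u => (sm.1 + (altAux f (n - k * u - 1) (k - 1) sm.2).1,
                      (altAux f (n - k * u - 1) (k - 1) sm.2).2))
        (0, d)).2).insert (n, k)
      (((PySem.List.pyRange 0 (PySem.Int.floordiv n k) 1).foldl
        (fun sm u => (sm.1 + (altAux f (n - k * u - 1) (k - 1) sm.2).1,
                      (altAux f (n - k * u - 1) (k - 1) sm.2).2))
        (0, d)).1) := by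
  rw [altAux.eq_def]; simp [h3, hg]

theorem altLoop (f : Nat) (n k : Int)
    (IH : ∀ (n' : Int) (d : PySem.Dict (Int × Int) Int), pvInv d →
      (altAux f n' (k - 1) d).1 = compute_p_k n' (k - 1) ∧ pvInv (altAux f n' (k - 1) d).2) :
    ∀ (us : List Int) (s : Int) (d : PySem.Dict (Int × Int) Int), pvInv d →
      (us.foldl (fun sm u => (sm.1 + (altAux f (n - k * u - 1) (k - 1) sm.2).1,
                              (altAux f (n - k * u - 1) (k - 1) sm.2).2)) (s, d)).1
        = us.foldl (fun s u => s + compute_p_k (n - k * u - 1) (k - 1)) s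
      ∧ pvInv (us.foldl (fun sm u => (sm.1 + (altAux f (n - k * u - 1) (k - 1) sm.2).1,
                              (altAux f (n - k * u - 1) (k - 1) sm.2).2)) (s, d)).2 := by
  intro us
  induction us with
  | nil => intro s d hd; exact ⟨rfl, hd⟩
  | cons u us ih =>
    intro s d hd
    obtain ⟨hv, hd'⟩ := IH (n - k * u - 1) d hd
    simp only [List.foldl_cons]
    have hv' : (altAux f (n - k * u - 1) (k - 1) ((s : Int), d).2).1
        = compute_p_k (n - k * u - 1) (k - 1) := hv
    rw [hv']
    have hd'' : pvInv (altAux f (n - k * u - 1) (k - 1) ((s : Int), d).2).2 := hd'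
    exact ih _ _ hd''

theorem altAux_correct (f : Nat) : ∀ (n k : Int) (d : PySem.Dict (Int × Int) Int),
    3 ≤ k → k - 3 ≤ (f : Int) → pvInv d →
    (altAux f n k d).1 = compute_p_k n k ∧ pvInv (altAux f n k d).2 := by
  induction f with
  | zero =>
    intro n k d hk hf hd
    have : k = 3 := by omega
    subst this
    rw [altAux_three]
    refine ⟨?_, hd⟩
    show pvBBase n = compute_p_k n 3
    unfold compute_p_k
    rw [computeAux_three, base_eq]
  | succ f ih =>
    intro n k d hk hf hd
    by_cases hk3 : k = 3
    · subst hk3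
      rw [altAux_three]
      refine ⟨?_, hd⟩
      show pvBBase n = compute_p_k n 3
      unfold compute_p_k
      rw [computeAux_three, base_eq]
    · have hk4 : 4 ≤ k := by omega
      have hspec : compute_p_k n k =
          (PySem.List.pyRange 0 (PySem.Int.floordiv n k) 1).foldl
            (fun s u => s + compute_p_k (n - k * u - 1) (k - 1)) 0 := by
        unfold compute_p_k
        rw [computeAux_fuel (k - 3).toNat (f + 1) n k hk (by omega) (by push_cast; omega)]
        rw [computeAux_succ f n k hk3]
        congr 1
        funext s u
        rw [computeAux_fuel f (k - 1 - 3).toNat (n - k * u - 1) (k - 1) (by omega)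
          (by push_cast at hf ⊢; omega) (by omega)]
      cases hget : d.get? (n, k) with
      | some v =>
        rw [altAux_hit (f + 1) n k d v hk3 hget]
        exact ⟨hd n k v hget, hd⟩
      | none =>
        have IH' : ∀ (n' : Int) (d' : PySem.Dict (Int × Int) Int), pvInv d' →
            (altAux f n' (k - 1) d').1 = compute_p_k n' (k - 1) ∧ pvInv (altAux f n' (k - 1) d').2 :=
          fun n' d' hd' => ih n' (k - 1) d' (by omega) (by push_cast at hf ⊢; omega) hd'
        obtain ⟨hfst, hinv⟩ := altLoop f n k IH'
          (PySem.List.pyRange 0 (PySem.Int.floordiv n k) 1) 0 d hd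
        constructor
        · rw [altAux_miss_fst f n k d hk3 hget]
          exact hfst.trans hspec.symm
        · rw [altAux_miss_snd f n k d hk3 hget]
          intro m j v hv
          by_cases hmj : (m, j) = (n, k)
          · injection hmj with hm hj
            subst hm; subst hj
            rw [PySem.Dict.get?_insert_self] at hv
            have hx := Option.some.inj hv
            rw [← hx]
            exact hfst.trans hspec.symm
          · rw [PySem.Dict.get?_insert_of_ne _ _ hmj] at hv
            exact hinv m j v hv

-- ===== VERDICT (by name: the statement is the Claim_ definition above) =====
theorem compute_p_k_spec : Claim_equal_compute_p_k := by
  intro n k _ hpre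
  unfold Spec_compute_p_k
  by_cases hk : 3 ≤ k
  · unfold compute_p_k_alt
    have h := altAux_correct (k - 3).toNat n k PySem.Dict.empty hk (by omega) inv_empty
    exact h.1.symm
  · have hk3 : k ≠ 3 := by omega
    have h0 : (k - 3).toNat = 0 := by omega
    unfold compute_p_k compute_p_k_alt
    rw [h0, computeAux.eq_def, altAux.eq_def]
    simp [hk3, PySem.Dict.get?_empty]
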